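-- pv_equiv track=rewrite | github.com/Lim0H/FFFactory | FFFactory/utils/auto_slicer/prusa_slicer/prusa_cmd_tools.py | _generate_info_table
-- ===== SOURCE A (Python) =====
-- from typing import Generator, TypedDict
--
-- def _generate_info_table(cmd_result: str) -> Generator[str, None, None]:
--     accumulate_result = ''
--     for line in cmd_result.split('\n'):
--         if line.startswith('[') and accumulate_result:
--             yield accumulate_result
--             accumulate_result = ''
--         accumulate_result += line + '\n'
--     yield accumulate_result
-- ===== SOURCE B (Python) =====
-- from typing import Generator
--
--
-- def _generate_info_table(cmd_result: str) -> Generator[str, None, None]: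
--     lines = cmd_result.split('\n')
--     starts = [0] + [i for i in range(1, len(lines)) if lines[i].startswith('[')]
--     bounds = starts + [len(lines)]
--     for a, b in zip(bounds, bounds[1:]):
--         yield '\n'.join(lines[a:b]) + '\n'
-- ===== Notes on version B (the rewrite author's own statement) =====
-- stated objective: alternative
-- what changed: Replaces the running string accumulator with flushes at bracket lines by a two-pass index-table decomposition: first collect the section-start line indices, then slice the line list at consecutive boundaries and join each chunk.
import Mathlib
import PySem

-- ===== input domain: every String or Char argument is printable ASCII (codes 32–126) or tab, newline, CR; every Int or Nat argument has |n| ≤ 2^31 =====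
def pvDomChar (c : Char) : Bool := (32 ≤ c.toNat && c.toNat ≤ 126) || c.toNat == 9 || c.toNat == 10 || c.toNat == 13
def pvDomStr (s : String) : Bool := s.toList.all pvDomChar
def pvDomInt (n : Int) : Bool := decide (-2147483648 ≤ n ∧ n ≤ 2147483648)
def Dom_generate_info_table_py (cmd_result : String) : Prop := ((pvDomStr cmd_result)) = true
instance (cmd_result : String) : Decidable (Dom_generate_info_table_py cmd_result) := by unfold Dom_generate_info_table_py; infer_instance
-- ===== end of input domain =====

-- B groups the output lines by a precomputed index table of bracket-section starts and boundary slices,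
-- instead of A's running string accumulator flushed inline at bracket lines; same return value (alternative decomposition).

-- ===== PORT A =====
-- A's for-loop: state = the accumulated string (as List Char); the yields become list elements
def pvLoopA : List (List Char) → List Char → List (List Char)
  | [], acc => [acc]
  | l :: ls, acc =>
    if PySem.Chars.startswith l ['['] && !acc.isEmpty then
      acc :: pvLoopA ls ([] ++ l ++ ['\n'])
    else
      pvLoopA ls (acc ++ l ++ ['\n'])

def generate_info_table_py (cmd_result : String) : List String :=
  (pvLoopA (PySem.Chars.splitOn cmd_result.toList ['\n']) []).map String.ofList

-- ===== PORT B =====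
-- Source B on List Char: start-index table, then consecutive-boundary slices joined back
-- (lines.getD i [] ports the guaranteed-in-range access lines[i], i drawn from range(1, len(lines)))
def pvChunksB (lines : List (List Char)) : List (List Char) :=
  let starts : List Nat :=
    0 :: (List.range lines.length).filter (fun i => decide (1 ≤ i) && PySem.Chars.startswith (lines.getD i []) ['['])
  let bounds := starts ++ [lines.length]
  (bounds.zip bounds.tail).map
    (fun ab => PySem.Chars.join ['\n'] (PySem.List.slice lines (some (ab.1 : Int)) (some (ab.2 : Int))) ++ ['\n'])

def generate_info_table_py_alt (cmd_result : String) : List String :=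
  (pvChunksB (PySem.Chars.splitOn cmd_result.toList ['\n'])).map String.ofList

-- ===== PRECONDITION & SPEC =====
def Spec_generate_info_table_py (cmd_result : String) (out : List String) : Prop := out = generate_info_table_py_alt cmd_result
instance (cmd_result : String) (out : List String) : Decidable (Spec_generate_info_table_py cmd_result out) := by unfold Spec_generate_info_table_py; infer_instance

-- ===== CLAIM (what is proved, stated in full; the proofs are below) =====
def Claim_equal_generate_info_table_py : Prop := ∀ (cmd_result : String), Dom_generate_info_table_py cmd_result → Spec_generate_info_table_py cmd_result (generate_info_table_py cmd_result)

-- ===== LEMMAS AND PROOFS =====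

-- emit one chunk of lines the way both programs render it
def pvEmit (c : List (List Char)) : List Char := PySem.Chars.join ['\n'] c ++ ['\n']

-- canonical grouping of the lines after the first into chunks; cur = current chunk so far
def pvGrp : List (List Char) → List (List Char) → List (List (List Char))
  | cur, [] => [cur]
  | cur, l :: ls =>
    if PySem.Chars.startswith l ['['] then cur :: pvGrp [l] ls else pvGrp (cur ++ [l]) ls

-- B's start-index list and chunk renderer, named for the proofs
def pvF (lines : List (List Char)) : List Nat :=
  (List.range lines.length).filter (fun i => decide (1 ≤ i) && PySem.Chars.startswith (lines.getD i []) ['['])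

def pvf (lines : List (List Char)) (ab : Nat × Nat) : List Char :=
  PySem.Chars.join ['\n'] (PySem.List.slice lines (some (ab.1 : Int)) (some (ab.2 : Int))) ++ ['\n']

theorem pvChunksB_def (lines : List (List Char)) :
    pvChunksB lines =
      ((0 :: (pvF lines ++ [lines.length])).zip (pvF lines ++ [lines.length])).map (pvf lines) := rfl

theorem pv_splitOn_go_ne (sep : List Char) (fuel : Nat) :
    ∀ (l cur : List Char) (acc : List (List Char)),
      PySem.Chars.splitOn.go sep fuel l cur acc ≠ [] := by
  induction fuel with
  | zero => intro l cur acc; simp [PySem.Chars.splitOn.go]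
  | succ n ih =>
    intro l cur acc
    cases l with
    | nil => simp [PySem.Chars.splitOn.go]
    | cons c rest =>
      rw [PySem.Chars.splitOn.go]
      split <;> apply ih

theorem pv_splitOn_ne_nil (s sep : List Char) : PySem.Chars.splitOn s sep ≠ [] :=
  pv_splitOn_go_ne sep (s.length + 1) s [] []

theorem pv_emit_ne_nil (c : List (List Char)) : pvEmit c ≠ [] := by
  simp [pvEmit]

theorem pv_join_append (c : List (List Char)) (l : List Char) (h : c ≠ []) :
    PySem.Chars.join ['\n'] (c ++ [l]) = PySem.Chars.join ['\n'] c ++ '\n' :: l := by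
  induction c with
  | nil => simp at h
  | cons a cs ih =>
    cases cs with
    | nil => simp [PySem.Chars.join, List.intercalate]
    | cons b cs' =>
      have h1 := ih (by simp)
      simp only [List.cons_append] at h1 ⊢
      rw [PySem.Chars.join_cons_cons, PySem.Chars.join_cons_cons, h1]
      simp

theorem pv_emit_append (c : List (List Char)) (l : List Char) (h : c ≠ []) :
    pvEmit c ++ l ++ ['\n'] = pvEmit (c ++ [l]) := by
  rw [pvEmit, pvEmit, pv_join_append c l h]
  simp

theorem pv_loopA_eq_grp (ls : List (List Char)) :
    ∀ cur : List (List Char), cur ≠ [] →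
      pvLoopA ls (pvEmit cur) = (pvGrp cur ls).map pvEmit := by
  induction ls with
  | nil => intro cur _; simp [pvLoopA, pvGrp]
  | cons l ls ih =>
    intro cur hcur
    by_cases hP : PySem.Chars.startswith l ['['] = true
    · have : pvLoopA (l :: ls) (pvEmit cur) = pvEmit cur :: pvLoopA ls ([] ++ l ++ ['\n']) := by
        rw [pvLoopA]
        rw [if_pos (by simp [hP, List.isEmpty_eq_false_iff.mpr (pv_emit_ne_nil cur)])]
      rw [this, pvGrp, if_pos hP]
      have hl : ([] : List Char) ++ l ++ ['\n'] = pvEmit [l] := by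
        simp [pvEmit, PySem.Chars.join_singleton]
      rw [hl, ih [l] (by simp), List.map_cons]
    · have : pvLoopA (l :: ls) (pvEmit cur) = pvLoopA ls (pvEmit cur ++ l ++ ['\n']) := by
        rw [pvLoopA, if_neg (by simp [hP])]
      rw [this, pv_emit_append cur l hcur, pvGrp,
        if_neg hP, ih (cur ++ [l]) (by simp)]

-- no '[' line in ls: one single chunk
theorem pv_grp_no_bracket (ls : List (List Char)) :
    ∀ cur, (∀ l ∈ ls, PySem.Chars.startswith l ['['] = false) →
      pvGrp cur ls = [cur ++ ls] := by
  induction ls with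
  | nil => intro cur _; simp [pvGrp]
  | cons l ls ih =>
    intro cur hno
    rw [pvGrp, if_neg (by simp [hno l (by simp)]), ih (cur ++ [l]) (fun x hx => hno x (by simp [hx]))]
    simp

-- first '[' line of ls at position k: chunk boundary there
theorem pv_grp_first (k : Nat) : ∀ (ls cur : List (List Char)) (hk : k < ls.length),
    (∀ i, (hi : i < k) → PySem.Chars.startswith (ls[i]'(by omega)) ['['] = false) →
    PySem.Chars.startswith (ls[k]'hk) ['['] = true →
    pvGrp cur ls = (cur ++ ls.take k) :: pvGrp [ls[k]'hk] (ls.drop (k + 1)) := by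
  induction k with
  | zero =>
    intro ls cur hk hmin hPk
    cases ls with
    | nil => simp at hk
    | cons a rest =>
      simp only [List.getElem_cons_zero] at hPk
      rw [pvGrp, if_pos hPk]
      simp
  | succ k ih =>
    intro ls cur hk hmin hPk
    cases ls with
    | nil => simp at hk
    | cons a rest =>
      have ha : PySem.Chars.startswith a ['['] = false := hmin 0 (by omega)
      rw [pvGrp, if_neg (by simp [ha]),
        ih rest (cur ++ [a]) (by simpa using hk) (fun i hi => hmin (i + 1) (by omega)) (by simpa using hPk)]
      simp

-- B's filter predicate, named
def pvP (lines : List (List Char)) (i : Nat) : Bool :=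
  decide (1 ≤ i) && PySem.Chars.startswith (lines.getD i []) ['[']

theorem pvF_eq (lines : List (List Char)) :
    pvF lines = (List.range lines.length).filter (pvP lines) := rfl

-- the start-index list, when its first entry is k+1, decomposes through dropping k+1 lines
theorem pv_F_step (l₀ : List Char) (ls : List (List Char)) (k : Nat)
    (hk : k < ls.length)
    (hPk : PySem.Chars.startswith (ls[k]'hk) ['['] = true)
    (hmin : ∀ i, i < k + 1 → pvP (l₀ :: ls) i = false) :
    pvF (l₀ :: ls) = (k + 1) :: (pvF (ls.drop k)).map (fun x => (k + 1) + x) := by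
  have hlen : (l₀ :: ls).length = (k + 1) + (ls.length - k) := by simp; omega
  obtain ⟨m', hm'⟩ : ∃ m', ls.length - k = m' + 1 := ⟨ls.length - k - 1, by omega⟩
  have hdlen : (ls.drop k).length = ls.length - k := by simp
  rw [pvF_eq, pvF_eq, hlen, hdlen, List.range_add, List.filter_append, List.filter_map,
    List.filter_eq_nil_iff.mpr (fun a ha => by
      simp only [Bool.not_eq_true]
      exact hmin a (List.mem_range.mp ha)), List.nil_append]
  rw [hm', List.range_succ_eq_map, List.filter_cons, List.filter_cons]
  have hp0 : (pvP (l₀ :: ls) ∘ fun x => (k + 1) + x) 0 = true := by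
    simp only [Function.comp_apply, Nat.add_zero, pvP]
    rw [List.getD_eq_getElem _ _ (by simp; omega)]
    simp [hPk]
  have hd0 : pvP (ls.drop k) 0 = false := by
    simp [pvP]
  rw [hp0, hd0]
  simp only [Bool.false_eq_true, if_false, if_true, List.filter_map, List.map_cons, List.map_map,
    Nat.add_zero]
  have hptwise : ∀ i ∈ List.range m',
      ((pvP (l₀ :: ls) ∘ fun x => (k + 1) + x) ∘ Nat.succ) i = (pvP (ls.drop k) ∘ Nat.succ) i := by
    intro i hi
    have him : i + 1 < ls.length - k := by have := List.mem_range.mp hi; omega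
    simp only [Function.comp_apply, pvP, Nat.succ_eq_add_one]
    rw [List.getD_eq_getElem (l₀ :: ls) [] (by simp; omega),
        List.getD_eq_getElem (ls.drop k) [] (by simp; omega),
        List.getElem_drop]
    have e2 : k + 1 + (i + 1) = (k + (i + 1)) + 1 := by omega
    simp only [e2, List.getElem_cons_succ]
    have e3 : (1 ≤ (k + (i + 1)) + 1) = True := by simp
    have e4 : (1 ≤ i + 1) = True := by simp
    simp [e3, e4]
  rw [List.filter_congr hptwise]

-- B's chunk list equals the canonical grouping (strong induction on an upper length bound)
theorem pv_chunksB_eq_aux (N : Nat) : ∀ (lines : List (List Char)), lines.length ≤ N →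
    (h : lines ≠ []) →
    pvChunksB lines = (pvGrp [lines.head h] lines.tail).map pvEmit := by
  induction N with
  | zero =>
    intro lines hlen h
    cases lines with
    | nil => exact absurd rfl h
    | cons a t => simp at hlen
  | succ N ih =>
    intro lines hlen h
    obtain ⟨l₀, ls, rfl⟩ : ∃ a t, lines = a :: t := by
      cases lines with
      | nil => exact absurd rfl h
      | cons a t => exact ⟨a, t, rfl⟩
    simp only [List.head_cons, List.tail_cons]
    cases hS : pvF (l₀ :: ls) with
    | nil =>
      have hno : ∀ l ∈ ls, PySem.Chars.startswith l ['['] = false := by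
        intro l hl
        obtain ⟨k, hk, rfl⟩ := List.mem_iff_getElem.mp hl
        have hmem : k + 1 ∈ List.range (l₀ :: ls).length := by
          simp only [List.mem_range, List.length_cons]; omega
        have := List.filter_eq_nil_iff.mp (pvF_eq (l₀ :: ls) ▸ hS) (k + 1) hmem
        simp only [pvP, Bool.and_eq_true, decide_eq_true_eq, not_and] at this
        have h2 := this (by omega)
        rw [List.getD_eq_getElem (l₀ :: ls) [] (by simp; omega)] at h2
        simpa using h2
      rw [pvChunksB_def, hS, pv_grp_no_bracket ls [l₀] hno]
      simp only [List.nil_append, List.zip_cons_cons, List.zip_nil_right, List.map_cons,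
        List.map_nil, List.cons_append]
      simp [pvf, pvEmit]
      have hc : ((ls.length : Int) + 1) = (((ls.length + 1 : Nat)) : Int) := by push_cast; ring
      rw [hc, PySem.List.slice_to_natCast]
      simp
    | cons j S' =>
      have hjmem : j ∈ pvF (l₀ :: ls) := by rw [hS]; exact List.mem_cons_self
      have hj := List.mem_filter.mp (pvF_eq (l₀ :: ls) ▸ hjmem)
      have hjn : j < (l₀ :: ls).length := List.mem_range.mp hj.1
      have hj1 : 1 ≤ j := by
        have := hj.2
        simp only [pvP, Bool.and_eq_true, decide_eq_true_eq] at this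
        exact this.1
      obtain ⟨k, rfl⟩ : ∃ k, j = k + 1 := ⟨j - 1, by omega⟩
      have hkls : k < ls.length := by simpa using hjn
      have hPk : PySem.Chars.startswith (ls[k]'hkls) ['['] = true := by
        have := hj.2
        simp only [pvP, Bool.and_eq_true, decide_eq_true_eq] at this
        rw [List.getD_eq_getElem (l₀ :: ls) [] hjn] at this
        simpa using this.2
      have hsorted : List.Pairwise (· < ·) (pvF (l₀ :: ls)) := by
        rw [pvF_eq]; exact List.Pairwise.filter _ List.pairwise_lt_range
      rw [hS] at hsorted
      have hgt : ∀ x ∈ S', k + 1 < x := (List.pairwise_cons.mp hsorted).1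
      have hmin : ∀ i, i < k + 1 → pvP (l₀ :: ls) i = false := by
        intro i hik
        by_contra hpi
        have hpi' : pvP (l₀ :: ls) i = true := by
          cases hx : pvP (l₀ :: ls) i
          · exact absurd hx hpi
          · rfl
        have hin : i ∈ pvF (l₀ :: ls) := by
          rw [pvF_eq]
          exact List.mem_filter.mpr ⟨List.mem_range.mpr (by omega), hpi'⟩
        rw [hS] at hin
        rcases List.mem_cons.mp hin with h' | h'
        · omega
        · exact absurd (hgt i h') (by omega)
      have hdne : ls.drop k ≠ [] := by
        apply List.ne_nil_of_length_pos
        simp only [List.length_drop]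
        omega
      have hdlen : (ls.drop k).length = ls.length - k := by simp
      have hstep := pv_F_step l₀ ls k hkls hPk hmin
      -- the recursion: B on lines = first chunk :: B on the dropped lines
      have hrec : pvChunksB (l₀ :: ls) =
          pvf (l₀ :: ls) (0, k + 1) :: pvChunksB (ls.drop k) := by
        rw [pvChunksB_def, pvChunksB_def, hstep, hdlen]
        have hn : (l₀ :: ls).length = (k + 1) + (ls.length - k) := by simp; omega
        rw [hn]
        simp only [List.cons_append, List.map_cons, List.zip_cons_cons]
        congr 1
        have hb : (pvF (ls.drop k)).map (fun x => (k + 1) + x) ++ [(k + 1) + (ls.length - k)]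
            = ((pvF (ls.drop k)) ++ [ls.length - k]).map (fun x => (k + 1) + x) := by
          simp
        rw [hb]
        have hcons : (k + 1) :: ((pvF (ls.drop k)) ++ [ls.length - k]).map (fun x => (k + 1) + x)
            = ((0 :: ((pvF (ls.drop k)) ++ [ls.length - k])).map (fun x => (k + 1) + x)) := by
          simp
        rw [hcons, List.zip_map, List.map_map]
        apply List.map_congr_left
        rintro ⟨a, b⟩ _
        simp only [Function.comp_apply, Prod.map_apply, pvf, PySem.List.slice_natCast]
        rw [List.drop_drop]
        have h1 : (k + 1) + b - ((k + 1) + a) = b - a := by omega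
        have h3 : k + 1 + a = (k + a) + 1 := by omega
        rw [h1, h3, List.drop_succ_cons]
      rw [hrec, ih _ (by simp only [hdlen]; simp at hlen; omega) hdne]
      rw [List.head_drop, List.tail_drop]
      rw [pv_grp_first k ls [l₀] hkls (fun i hi => by
          have hm := hmin (i + 1) (by omega)
          simp only [pvP, Bool.and_eq_false_iff, decide_eq_false_iff_not] at hm
          rcases hm with hm | hm
          · omega
          · rw [List.getD_eq_getElem (l₀ :: ls) [] (by simp; omega)] at hm
            simpa using hm) hPk]
      simp only [List.map_cons]
      congr 1
      simp only [pvf, pvEmit, PySem.List.slice_natCast]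
      simp [List.take_succ_cons]

theorem pv_chunksB_eq (lines : List (List Char)) (h : lines ≠ []) :
    pvChunksB lines = (pvGrp [lines.head h] lines.tail).map pvEmit :=
  pv_chunksB_eq_aux lines.length lines le_rfl h

-- ===== VERDICT (by name: the statement is the Claim_ definition above) =====
theorem generate_info_table_py_spec : Claim_equal_generate_info_table_py := by
  intro s _
  unfold Spec_generate_info_table_py generate_info_table_py generate_info_table_py_alt
  obtain ⟨l₀, ls, hsplit⟩ : ∃ a t, PySem.Chars.splitOn s.toList ['\n'] = a :: t := by
    cases hc : PySem.Chars.splitOn s.toList ['\n'] with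
    | nil => exact absurd hc (pv_splitOn_ne_nil _ _)
    | cons a t => exact ⟨a, t, rfl⟩
  rw [hsplit]
  have h1 : pvLoopA (l₀ :: ls) [] = pvLoopA ls (pvEmit [l₀]) := by
    rw [pvLoopA, if_neg (by simp)]
    simp [pvEmit, PySem.Chars.join_singleton]
  rw [h1, pv_loopA_eq_grp ls [l₀] (by simp),
    pv_chunksB_eq (l₀ :: ls) (by simp)]
  simp
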